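-- pv_equiv track=rewrite | github.com/SGmuwa/maxsumletarget | main.py | _enum_half
-- ===== SOURCE A (Python) =====
-- from typing import List, Tuple
--
-- def _enum_half(nums: List[int], bits: List[int], start: int, end: int, target: int) -> dict[int, int]:
--     """
--     Enumerate all subsets of nums[start:end].
--     Return dict: sum -> best_signature (tie-break by signature).
--     Only keeps sums <= target.
--     """
--     pairs = [(0, 0)]  # (sum, signature)
--     for i in range(start, end):
--         v, b = nums[i], bits[i]
--         pairs += [(s + v, sig | b) for s, sig in pairs]
--
--     best = {}
--     for s, sig in pairs:
--         if s <= target: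
--             prev = best.get(s)
--             if prev is None or sig > prev:
--                 best[s] = sig
--     return best
-- ===== SOURCE B (Python) =====
-- def _enum_half(nums, bits, start, end, target):
--     # Direct bitmask enumeration: each subset index j of range(2**n) is decoded
--     # on the fly (no incrementally doubled pairs list), folding straight into the dict.
--     n = max(end - start, 0)
--     best = {}
--     for j in range(1 << n):
--         s = 0
--         sig = 0
--         for i in range(n):
--             if (j >> i) & 1:
--                 s += nums[start + i]
--                 sig |= bits[start + i]
--         if s <= target:
--             prev = best.get(s)
--             if prev is None or sig > prev:
--                 best[s] = sig
--     return best
-- ===== Notes on version B (the rewrite author's own statement) =====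
-- stated objective: alternative
-- what changed: Replaces the incrementally doubled pairs list (pairs += shifted copy per element) by direct bitmask enumeration: each subset index j < 2^n is decoded from its bits on the fly and folded straight into the best-signature dict, with no intermediate pairs list.
import Mathlib
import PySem

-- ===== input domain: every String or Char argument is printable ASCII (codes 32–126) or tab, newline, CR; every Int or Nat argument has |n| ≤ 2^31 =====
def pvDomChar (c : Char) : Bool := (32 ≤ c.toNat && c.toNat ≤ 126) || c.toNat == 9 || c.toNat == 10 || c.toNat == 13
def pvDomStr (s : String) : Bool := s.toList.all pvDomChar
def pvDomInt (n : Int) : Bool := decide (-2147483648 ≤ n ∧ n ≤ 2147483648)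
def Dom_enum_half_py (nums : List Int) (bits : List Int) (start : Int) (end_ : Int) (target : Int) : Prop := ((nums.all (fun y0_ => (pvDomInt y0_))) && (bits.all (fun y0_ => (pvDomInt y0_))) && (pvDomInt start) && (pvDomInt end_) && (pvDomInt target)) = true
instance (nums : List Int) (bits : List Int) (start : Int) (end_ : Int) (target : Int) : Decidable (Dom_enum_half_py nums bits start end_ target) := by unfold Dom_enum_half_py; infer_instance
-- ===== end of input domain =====

-- B replaces A's incrementally doubled pairs list by direct bitmask decoding of each
-- subset index, folding straight into the dict (objective: alternative decomposition).
-- ===== PORT A =====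
-- the dict-maintenance code `if s <= target: prev = best.get(s); …` is literally
-- identical in Source A and Source B, so both ports share its transliteration pvUpd
def pvUpd (target : Int) (best : PySem.Dict Int Int) (p : Int × Int) : PySem.Dict Int Int :=
  if p.1 ≤ target then
    match best.get? p.1 with
    | none => best.insert p.1 p.2
    | some prev => if p.2 > prev then best.insert p.1 p.2 else best
  else best

-- one step of A's `for i in range(start, end)` loop (nums[i] / bits[i] may IndexError: none, excluded by Pre_)
def pvStepA (nums bits : List Int) (pairs : List (Int × Int)) (i : Int) : List (Int × Int) :=
  match PySem.List.pyGet? nums i, PySem.List.pyGet? bits i with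
  | some v, some b => pairs ++ pairs.map (fun p => (p.1 + v, PySem.Int.bor p.2 b))
  | _, _ => pairs

def enum_half_py (nums : List Int) (bits : List Int) (start : Int) (end_ : Int) (target : Int) : List (Int × Int) :=
  let pairs := (PySem.List.pyRange start end_ 1).foldl (pvStepA nums bits) [(0, 0)]
  (pairs.foldl (pvUpd target) (PySem.Dict.mk [])).items

-- ===== PORT B =====
-- B's inner loop: decode subset index j — sum and or the elements at the set bits
def pvSubPair (nums bits : List Int) (start : Int) (N : Nat) (j : Nat) : Int × Int :=
  (List.range N).foldl
    (fun p i =>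
      if (j >>> i) &&& 1 == 1 then
        match PySem.List.pyGet? nums (start + (i : Int)), PySem.List.pyGet? bits (start + (i : Int)) with
        | some v, some b => (p.1 + v, PySem.Int.bor p.2 b)
        | _, _ => p
      else p)
    (0, 0)

def enum_half_py_alt (nums : List Int) (bits : List Int) (start : Int) (end_ : Int) (target : Int) : List (Int × Int) :=
  let N : Nat := (max (end_ - start) 0).toNat
  ((List.range (2 ^ N)).foldl
      (fun best j => pvUpd target best (pvSubPair nums bits start N j))
      (PySem.Dict.mk [])).items

-- ===== PRECONDITION & SPEC =====
-- Pre_ excludes exactly the inputs where A raises IndexError (some i in range(start,end)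
-- is out of range for nums or bits); Python negative-index wraparound stays inside.
def Pre_enum_half_py (nums : List Int) (bits : List Int) (start : Int) (end_ : Int) (target : Int) : Prop :=
  start < end_ →
    (-(nums.length : Int) ≤ start ∧ end_ ≤ (nums.length : Int) ∧
     -(bits.length : Int) ≤ start ∧ end_ ≤ (bits.length : Int))
instance (nums : List Int) (bits : List Int) (start : Int) (end_ : Int) (target : Int) : Decidable (Pre_enum_half_py nums bits start end_ target) := by unfold Pre_enum_half_py; infer_instance
def pvWitness_enum_half_py : List Int × List Int × Int × Int × Int := ([1, 2, 2], [1, 2, 4], 0, 3, 4)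

def Spec_enum_half_py (nums : List Int) (bits : List Int) (start : Int) (end_ : Int) (target : Int) (out : List (Int × Int)) : Prop := out = enum_half_py_alt nums bits start end_ target
instance (nums : List Int) (bits : List Int) (start : Int) (end_ : Int) (target : Int) (out : List (Int × Int)) : Decidable (Spec_enum_half_py nums bits start end_ target out) := by unfold Spec_enum_half_py; infer_instance

-- ===== CLAIM (what is proved, stated in full; the proofs are below) =====
def Claim_equal_enum_half_py : Prop := ∀ (nums : List Int) (bits : List Int) (start : Int) (end_ : Int) (target : Int), Dom_enum_half_py nums bits start end_ target → Pre_enum_half_py nums bits start end_ target → Spec_enum_half_py nums bits start end_ target (enum_half_py nums bits start end_ target)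

-- ===== LEMMAS AND PROOFS =====

-- a subset index below 2^N has bit N clear: the extra step of pvSubPair (N+1) is skipped
theorem pvSubPair_lt (nums bits : List Int) (start : Int) (N : Nat) (j : Nat) (hj : j < 2 ^ N) :
    pvSubPair nums bits start (N + 1) j = pvSubPair nums bits start N j := by
  unfold pvSubPair
  rw [List.range_succ, List.foldl_append]
  have h0 : j >>> N = 0 := by
    rw [Nat.shiftRight_eq_div_pow]; exact Nat.div_eq_of_lt hj
  simp [h0]

-- adding 2^N to a subset index sets bit N and keeps the lower bits
theorem pvSubPair_add (nums bits : List Int) (start : Int) (N : Nat) (j : Nat) (hj : j < 2 ^ N)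
    (v b : Int)
    (hv : PySem.List.pyGet? nums (start + (N : Int)) = some v)
    (hb : PySem.List.pyGet? bits (start + (N : Int)) = some b) :
    pvSubPair nums bits start (N + 1) (2 ^ N + j) =
      ((pvSubPair nums bits start N j).1 + v, PySem.Int.bor (pvSubPair nums bits start N j).2 b) := by
  unfold pvSubPair
  rw [List.range_succ, List.foldl_append]
  have hbit : ∀ i : Nat, i < N → (2 ^ N + j) >>> i &&& 1 = j >>> i &&& 1 := by
    intro i hiN
    rw [Nat.and_one_is_mod, Nat.and_one_is_mod, Nat.shiftRight_eq_div_pow, Nat.shiftRight_eq_div_pow]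
    have hsplit : 2 ^ N = 2 ^ i * 2 ^ (N - i) := by
      rw [← pow_add]; congr 1; omega
    rw [hsplit, Nat.mul_add_div (Nat.two_pow_pos i)]
    have : 2 ^ (N - i) = 2 * 2 ^ (N - i - 1) := by
      rw [← pow_succ']; congr 1; omega
    omega
  have heq := PySem.List.foldl_congr_mem (List.range N)
    (fun (p : Int × Int) (i : Nat) =>
      if (2 ^ N + j) >>> i &&& 1 == 1 then
        match PySem.List.pyGet? nums (start + (i : Int)), PySem.List.pyGet? bits (start + (i : Int)) with
        | some v, some b => (p.1 + v, PySem.Int.bor p.2 b)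
        | _, _ => p
      else p)
    (fun (p : Int × Int) (i : Nat) =>
      if j >>> i &&& 1 == 1 then
        match PySem.List.pyGet? nums (start + (i : Int)), PySem.List.pyGet? bits (start + (i : Int)) with
        | some v, some b => (p.1 + v, PySem.Int.bor p.2 b)
        | _, _ => p
      else p)
    ((0 : Int), (0 : Int))
    (fun acc x hx => by simp only [hbit x (List.mem_range.mp hx)])
  rw [heq]
  have hbitN : (2 ^ N + j) >>> N &&& 1 = 1 := by
    rw [Nat.shiftRight_eq_div_pow]
    have h1 : (2 ^ N + j) / 2 ^ N = 1 := by
      rw [Nat.add_div_left _ (Nat.two_pow_pos N), Nat.div_eq_of_lt hj]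
    simp [h1]
  have hbitN' : (2 ^ N + j) >>> N % 2 = 1 := by rw [← Nat.and_one_is_mod]; exact hbitN
  simp [hbitN', hv, hb]

-- A's doubled pairs list is exactly the subset pairs in binary-counter order
theorem pairs_eq (nums bits : List Int) (start : Int) (N : Nat)
    (hv : ∀ k : Nat, k < N → (PySem.List.pyGet? nums (start + (k : Int))).isSome ∧
          (PySem.List.pyGet? bits (start + (k : Int))).isSome) :
    (PySem.List.pyRange start (start + (N : Int)) 1).foldl (pvStepA nums bits) [(0, 0)] =
      (List.range (2 ^ N)).map (pvSubPair nums bits start N) := by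
  induction N with
  | zero => simp [pvSubPair]
  | succ N ih =>
    have hvN : ∀ k : Nat, k < N → (PySem.List.pyGet? nums (start + (k : Int))).isSome ∧
        (PySem.List.pyGet? bits (start + (k : Int))).isSome := fun k hk => hv k (by omega)
    obtain ⟨hn, hb⟩ := hv N (by omega)
    obtain ⟨v, hvs⟩ := Option.isSome_iff_exists.mp hn
    obtain ⟨b, hbs⟩ := Option.isSome_iff_exists.mp hb
    rw [show ((N + 1 : Nat) : Int) = (N : Int) + 1 by push_cast; ring,
        show start + ((N : Int) + 1) = (start + (N : Int)) + 1 by ring,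
        PySem.List.pyRange_one_succ_right (by omega : start ≤ start + (N : Int)),
        List.foldl_append, ih hvN]
    simp only [List.foldl_cons, List.foldl_nil]
    rw [show pvStepA nums bits ((List.range (2 ^ N)).map (pvSubPair nums bits start N)) (start + (N : Int)) =
          (List.range (2 ^ N)).map (pvSubPair nums bits start N) ++
            ((List.range (2 ^ N)).map (pvSubPair nums bits start N)).map
              (fun p => (p.1 + v, PySem.Int.bor p.2 b)) by rw [pvStepA, hvs, hbs]]
    rw [show 2 ^ (N + 1) = 2 ^ N + 2 ^ N by rw [pow_succ]; omega,
        List.range_add, List.map_append]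
    congr 1
    · apply List.map_congr_left
      intro j hj
      exact (pvSubPair_lt nums bits start N j (List.mem_range.mp hj)).symm
    · simp only [List.map_map]
      apply List.map_congr_left
      intro j hj
      exact (pvSubPair_add nums bits start N j (List.mem_range.mp hj) v b hvs hbs).symm

-- ===== VERDICT (by name: the statement is the Claim_ definition above) =====
theorem enum_half_py_spec : Claim_equal_enum_half_py := by
  intro nums bits start end_ target _ hpre
  simp only [Spec_enum_half_py, enum_half_py, enum_half_py_alt]
  set N : Nat := (max (end_ - start) 0).toNat with hN
  have hNval : N = (end_ - start).toNat := by
    rw [hN]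
    by_cases h : end_ - start ≤ 0
    · rw [max_eq_right h]; omega
    · rw [max_eq_left (by omega)]
  clear_value N
  have hrange : PySem.List.pyRange start end_ 1 = PySem.List.pyRange start (start + (N : Int)) 1 := by
    rw [PySem.List.pyRange_one, PySem.List.pyRange_one]
    have harg : (start + (N : Int) - start).toNat = (end_ - start).toNat := by omega
    rw [harg]
  have hv : ∀ k : Nat, k < N → (PySem.List.pyGet? nums (start + (k : Int))).isSome ∧
      (PySem.List.pyGet? bits (start + (k : Int))).isSome := by
    intro k hk
    have hlt : start < end_ := by omega
    obtain ⟨h1, h2, h3, h4⟩ := hpre hlt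
    have hik : start + (k : Int) < end_ := by omega
    constructor <;>
    · rw [Option.isSome_iff_ne_none]
      intro hnone
      have h := (PySem.List.pyGet?_eq_none_iff _ _).mp hnone
      apply h
      unfold PySem.Raise.InRange
      constructor <;> omega
  rw [hrange, pairs_eq nums bits start N hv, List.foldl_map]
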